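-- pv_equiv track=rewrite | github.com/ooici/marine-integrations | mi/dataset/parser/sio_mule_common.py | _combine_adjacent_packets
-- ===== SOURCE A (Python) =====
-- START_IDX = 0
--
-- END_IDX = 1
--
-- def _combine_adjacent_packets(packets):
--     """
--     Combine packets which are adjacent and have the same start/end into one packet
--     i.e [[a,b], [b,c]] -> [[a,c]]
--     @param packets An array of packets, with the form [[start, end], [next_start, next_end], ...]
--     @retval A new array of packets where adjacent packets will have their indices combined into one
--     """
--     combined_packets = []
--     idx = 0
--     while idx < len(packets):
--         start_idx = packets[idx][START_IDX]
--         # loop until the end of this packet doesn't equal the start of the following packet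
--         next_inc = 0
--         while idx + next_inc + 1 < len(packets) and \
--         packets[idx + next_inc][END_IDX] == packets[idx + next_inc + 1][START_IDX]:
--             next_inc += 1
--
--         end_idx = packets[idx + next_inc][END_IDX]
--         # append the new combined packet indices
--         combined_packets.append([start_idx, end_idx])
--         idx = idx + next_inc + 1
--     return combined_packets
-- ===== SOURCE B (Python) =====
-- def _combine_adjacent_packets(packets):
--     """Single flat pass: keep a running [start, end] pair and flush it whenever
--     the next packet does not continue it."""
--     if not packets:
--         return []
--     combined = []
--     cur_start, cur_end = packets[0][0], packets[0][1]
--     for p in packets[1:]: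
--         if cur_end == p[0]:
--             cur_end = p[1]
--         else:
--             combined.append([cur_start, cur_end])
--             cur_start, cur_end = p[0], p[1]
--     combined.append([cur_start, cur_end])
--     return combined
-- ===== Notes on version B (the rewrite author's own statement) =====
-- stated objective: simpler
-- what changed: Replaced the nested inner while with index-jumping arithmetic by a single flat pass that maintains a running current [start, end] pair and flushes it when the next packet does not continue it.
import Mathlib
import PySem

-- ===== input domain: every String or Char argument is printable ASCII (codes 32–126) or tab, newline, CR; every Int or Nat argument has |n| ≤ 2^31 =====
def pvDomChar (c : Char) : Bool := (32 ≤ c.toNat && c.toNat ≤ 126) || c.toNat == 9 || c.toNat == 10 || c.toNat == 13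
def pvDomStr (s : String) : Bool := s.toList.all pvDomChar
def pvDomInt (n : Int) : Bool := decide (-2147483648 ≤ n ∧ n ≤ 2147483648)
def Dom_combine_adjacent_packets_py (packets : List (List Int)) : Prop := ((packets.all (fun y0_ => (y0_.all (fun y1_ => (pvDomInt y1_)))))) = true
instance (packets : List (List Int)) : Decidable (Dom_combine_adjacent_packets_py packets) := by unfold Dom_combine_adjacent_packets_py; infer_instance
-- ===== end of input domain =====

-- B replaces A's nested inner while and index-jumping by one flat pass with a running
-- current [start, end] pair (objective: simpler); same return value on every input where A returns.


-- ===== PORT A =====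
-- packets[j][0] / packets[j][1]; on Pre_ every access is in range, so getD's default is never used
def pvA0 (packets : List (List Int)) (j : Nat) : Int := (packets.getD j []).getD 0 0
def pvA1 (packets : List (List Int)) (j : Nat) : Int := (packets.getD j []).getD 1 0

-- the inner while loop: returns the final next_inc
def pvInnerA (packets : List (List Int)) (idx next_inc : Nat) : Nat :=
  if idx + next_inc + 1 < packets.length ∧
     pvA1 packets (idx + next_inc) = pvA0 packets (idx + next_inc + 1) then
    pvInnerA packets idx (next_inc + 1)
  else next_inc
termination_by packets.length - (idx + next_inc)
decreasing_by omega

-- the outer while loop over idx, accumulating combined_packets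
def pvOuterA (packets : List (List Int)) (idx : Nat) (acc : List (List Int)) : List (List Int) :=
  if idx < packets.length then
    let start_idx := pvA0 packets idx
    let next_inc := pvInnerA packets idx 0
    let end_idx := pvA1 packets (idx + next_inc)
    pvOuterA packets (idx + next_inc + 1) (acc ++ [[start_idx, end_idx]])
  else acc
termination_by packets.length - idx
decreasing_by omega

def combine_adjacent_packets_py (packets : List (List Int)) : List (List Int) :=
  pvOuterA packets 0 []

-- ===== PORT B =====
-- flat pass: current pair (cs, ce), flushed to acc when the next packet does not continue it
def pvGoB (cs ce : Int) (ps : List (List Int)) (acc : List (List Int)) : List (List Int) :=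
  match ps with
  | [] => acc ++ [[cs, ce]]
  | q :: qs =>
    if ce = q.getD 0 0 then pvGoB cs (q.getD 1 0) qs acc
    else pvGoB (q.getD 0 0) (q.getD 1 0) qs (acc ++ [[cs, ce]])

def combine_adjacent_packets_py_alt (packets : List (List Int)) : List (List Int) :=
  match packets with
  | [] => []
  | p :: rest => pvGoB (p.getD 0 0) (p.getD 1 0) rest []

-- ===== PRECONDITION & SPEC =====
-- Python A raises IndexError as soon as some packet has fewer than two entries; Pre_ excludes exactly those.
def Pre_combine_adjacent_packets_py (packets : List (List Int)) : Prop :=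
  ∀ p ∈ packets, 2 ≤ p.length
instance (packets : List (List Int)) : Decidable (Pre_combine_adjacent_packets_py packets) := by
  unfold Pre_combine_adjacent_packets_py; infer_instance

def pvWitness_combine_adjacent_packets_py : List (List Int) := [[1, 3], [3, 5], [7, 9]]

def Spec_combine_adjacent_packets_py (packets : List (List Int)) (out : List (List Int)) : Prop := out = combine_adjacent_packets_py_alt packets
instance (packets : List (List Int)) (out : List (List Int)) : Decidable (Spec_combine_adjacent_packets_py packets out) := by unfold Spec_combine_adjacent_packets_py; infer_instance

-- ===== CLAIM (what is proved, stated in full; the proofs are below) =====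
def Claim_equal_combine_adjacent_packets_py : Prop := ∀ (packets : List (List Int)), Dom_combine_adjacent_packets_py packets → Pre_combine_adjacent_packets_py packets → Spec_combine_adjacent_packets_py packets (combine_adjacent_packets_py packets)

-- ===== LEMMAS AND PROOFS =====

-- one step / stop of A's outer loop, for targeted rewriting
theorem pvOuterA_step (packets : List (List Int)) (idx : Nat) (acc : List (List Int))
    (h : idx < packets.length) :
    pvOuterA packets idx acc
      = pvOuterA packets (idx + pvInnerA packets idx 0 + 1)
          (acc ++ [[pvA0 packets idx, pvA1 packets (idx + pvInnerA packets idx 0)]]) := by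
  rw [pvOuterA, if_pos h]

theorem pvOuterA_stop (packets : List (List Int)) (idx : Nat) (acc : List (List Int))
    (h : ¬ idx < packets.length) :
    pvOuterA packets idx acc = acc := by
  rw [pvOuterA, if_neg h]

-- shifting the inner loop's accumulator by one is the same as starting one index later
theorem pvInnerA_shift_fuel (packets : List (List Int)) :
    ∀ fuel idx n, packets.length - (idx + n) ≤ fuel →
    pvInnerA packets idx (n + 1) = pvInnerA packets (idx + 1) n + 1 := by
  intro fuel
  induction fuel with
  | zero =>
    intro idx n h
    conv_lhs => rw [pvInnerA, if_neg (by intro ⟨h1, _⟩; omega)]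
    conv_rhs => rw [pvInnerA, if_neg (by intro ⟨h1, _⟩; omega)]
  | succ f ih =>
    intro idx n h
    by_cases hc : idx + n + 2 < packets.length ∧
        pvA1 packets (idx + n + 1) = pvA0 packets (idx + n + 2)
    · have hcl : idx + (n + 1) + 1 < packets.length ∧
          pvA1 packets (idx + (n + 1)) = pvA0 packets (idx + (n + 1) + 1) :=
        ⟨by omega, by convert hc.2 using 2⟩
      have hcr : idx + 1 + n + 1 < packets.length ∧
          pvA1 packets (idx + 1 + n) = pvA0 packets (idx + 1 + n + 1) :=
        ⟨by omega, by convert hc.2 using 2 <;> omega⟩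
      conv_lhs => rw [pvInnerA, if_pos hcl]
      conv_rhs => rw [pvInnerA, if_pos hcr]
      exact ih idx (n + 1) (by omega)
    · have hcl : ¬ (idx + (n + 1) + 1 < packets.length ∧
          pvA1 packets (idx + (n + 1)) = pvA0 packets (idx + (n + 1) + 1)) := by
        intro ⟨h1, h2⟩
        exact hc ⟨by omega, by convert h2 using 2⟩
      have hcr : ¬ (idx + 1 + n + 1 < packets.length ∧
          pvA1 packets (idx + 1 + n) = pvA0 packets (idx + 1 + n + 1)) := by
        intro ⟨h1, h2⟩
        exact hc ⟨by omega, by convert h2 using 2 <;> omega⟩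
      conv_lhs => rw [pvInnerA, if_neg hcl]
      conv_rhs => rw [pvInnerA, if_neg hcr]

theorem pvInnerA_shift (packets : List (List Int)) (idx n : Nat) :
    pvInnerA packets idx (n + 1) = pvInnerA packets (idx + 1) n + 1 :=
  pvInnerA_shift_fuel packets (packets.length - (idx + n)) idx n (le_refl _)

-- main bridge: B's flat loop, started with packets[idx]'s pair, equals A's outer loop resumed after the run
theorem pvGoB_eq_outer (packets : List (List Int)) :
    ∀ fuel idx, packets.length - idx ≤ fuel → idx < packets.length → ∀ (cs : Int) acc,
    pvGoB cs (pvA1 packets idx) (packets.drop (idx + 1)) acc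
      = pvOuterA packets (idx + pvInnerA packets idx 0 + 1)
          (acc ++ [[cs, pvA1 packets (idx + pvInnerA packets idx 0)]]) := by
  intro fuel
  induction fuel with
  | zero => intro idx h hlt; omega
  | succ f ih =>
    intro idx h hlt cs acc
    by_cases hnext : idx + 1 < packets.length
    · have hdrop : packets.drop (idx + 1) = packets[idx + 1] :: packets.drop (idx + 1 + 1) := by
        rw [List.drop_eq_getElem_cons hnext]
      have hA0 : packets[idx + 1].getD 0 0 = pvA0 packets (idx + 1) := by
        simp [pvA0, List.getD_eq_getElem?_getD, List.getElem?_eq_getElem hnext]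
      have hA1 : packets[idx + 1].getD 1 0 = pvA1 packets (idx + 1) := by
        simp [pvA1, List.getD_eq_getElem?_getD, List.getElem?_eq_getElem hnext]
      rw [hdrop, pvGoB]
      by_cases hc : pvA1 packets idx = pvA0 packets (idx + 1)
      · -- merge step: the inner loop takes at least one more step
        have hm : pvInnerA packets idx 0 = pvInnerA packets (idx + 1) 0 + 1 := by
          rw [pvInnerA, if_pos ⟨hnext, by simpa using hc⟩]
          simpa using pvInnerA_shift packets idx 0
        rw [if_pos (by rw [hA0]; exact hc), hA1,
            ih (idx + 1) (by omega) hnext cs acc, hm]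
        have e1 : idx + (pvInnerA packets (idx + 1) 0 + 1) + 1
            = idx + 1 + pvInnerA packets (idx + 1) 0 + 1 := by omega
        have e2 : idx + (pvInnerA packets (idx + 1) 0 + 1)
            = idx + 1 + pvInnerA packets (idx + 1) 0 := by omega
        rw [e1, e2]
      · -- flush step: the inner loop stops immediately
        have hm : pvInnerA packets idx 0 = 0 := by
          rw [pvInnerA, if_neg (by intro ⟨_, h2⟩; exact hc (by simpa using h2))]
        rw [if_neg (by rw [hA0]; exact hc), hA0, hA1, hm]
        simp only [Nat.add_zero]
        rw [pvOuterA_step packets (idx + 1)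
              (acc ++ [[cs, pvA1 packets idx]]) hnext]
        · exact ih (idx + 1) (by omega) hnext (pvA0 packets (idx + 1))
            (acc ++ [[cs, pvA1 packets idx]])
    · -- idx is the last index: nothing follows, the inner loop yields 0
      have hdrop : packets.drop (idx + 1) = [] := by
        apply List.drop_eq_nil_of_le; omega
      have hm : pvInnerA packets idx 0 = 0 := by
        rw [pvInnerA, if_neg (by intro ⟨h1, _⟩; omega)]
      rw [hdrop, pvGoB, hm]
      simp only [Nat.add_zero]
      rw [pvOuterA_stop packets (idx + 1) _ (by omega)]

theorem ports_agree (packets : List (List Int)) :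
    combine_adjacent_packets_py packets = combine_adjacent_packets_py_alt packets := by
  cases packets with
  | nil =>
    show pvOuterA [] 0 [] = []
    rw [pvOuterA_stop _ _ _ (by simp)]
  | cons p rest =>
    show pvOuterA (p :: rest) 0 [] = pvGoB (p.getD 0 0) (p.getD 1 0) rest []
    have hlt : 0 < (p :: rest).length := by simp
    have hA0 : pvA0 (p :: rest) 0 = p.getD 0 0 := by simp [pvA0]
    have hA1 : pvA1 (p :: rest) 0 = p.getD 1 0 := by simp [pvA1]
    have hgo := pvGoB_eq_outer (p :: rest) (p :: rest).length 0 (by omega) hlt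
      (p.getD 0 0) []
    simp only [List.drop_succ_cons, List.drop_zero] at hgo
    rw [pvOuterA_step _ 0 _ hlt, hA0, ← hgo, hA1]

-- ===== VERDICT (by name: the statement is the Claim_ definition above) =====
theorem combine_adjacent_packets_py_spec : Claim_equal_combine_adjacent_packets_py := by
  intro packets _ _
  unfold Spec_combine_adjacent_packets_py
  exact ports_agree packets
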